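-- pv_equiv track=rewrite | github.com/estelledoriot/NSI_1ere_Buffon_2020_2021 | 12_td_sudoku_complet.py | manquants_carre
-- ===== SOURCE A (Python) =====
-- def manquants_carre(sudoku,i,j):
--     # renvoie la liste des chiffres manquants dans le carre de la case (i,j)
--     liste=[]
--     i1 = 3*(i//3)
--     j1 = 3*(j//3)
--     for a in range(1,10):
--         manquant=True
--         for k in range(i1,i1+3):
--             for l in range(j1,j1+3):
--                 if sudoku[k][l]==a:
--                     manquant=False
--         if manquant:
--             liste.append(a)
--     return liste
-- ===== SOURCE B (Python) =====
-- def manquants_carre(sudoku, i, j):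
--     # renvoie la liste des chiffres manquants dans le carre de la case (i,j)
--     restants = list(range(1, 10))
--     for dk in range(3):
--         for dl in range(3):
--             v = sudoku[3 * (i // 3) + dk][3 * (j // 3) + dl]
--             if v in restants:
--                 restants.remove(v)
--     return restants
-- ===== Notes on version B (the rewrite author's own statement) =====
-- stated objective: alternative
-- what changed: B starts from the full candidate list 1..9 and erases each value found in one scan of the 3x3 block, instead of A's nine separate full-block scans (one per candidate digit) with a 'missing' flag.
import Mathlib
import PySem

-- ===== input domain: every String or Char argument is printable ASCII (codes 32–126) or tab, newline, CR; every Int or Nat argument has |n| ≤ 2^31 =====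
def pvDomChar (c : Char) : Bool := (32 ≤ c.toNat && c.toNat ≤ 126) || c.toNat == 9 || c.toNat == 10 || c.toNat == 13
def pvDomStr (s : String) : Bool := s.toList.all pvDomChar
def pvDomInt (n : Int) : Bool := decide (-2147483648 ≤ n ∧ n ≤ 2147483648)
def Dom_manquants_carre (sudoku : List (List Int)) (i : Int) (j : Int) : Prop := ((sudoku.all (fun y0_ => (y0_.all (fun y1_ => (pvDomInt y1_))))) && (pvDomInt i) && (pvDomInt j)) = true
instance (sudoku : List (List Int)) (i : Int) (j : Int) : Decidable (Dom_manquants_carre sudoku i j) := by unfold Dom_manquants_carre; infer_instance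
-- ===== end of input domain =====

-- B starts from the full candidate list 1..9 and erases each value found during one scan of
-- the 3x3 block, instead of A's nine separate full-block scans (one per candidate digit).

-- ===== PORT A =====
def manquants_carre (sudoku : List (List Int)) (i : Int) (j : Int) : List Int :=
  let i1 := 3 * (PySem.Int.floordiv i 3)
  let j1 := 3 * (PySem.Int.floordiv j 3)
  (PySem.List.pyRange 1 10 1).foldl (fun liste a =>
    let manquant := (PySem.List.pyRange i1 (i1 + 3) 1).foldl (fun m k =>
      (PySem.List.pyRange j1 (j1 + 3) 1).foldl (fun m' l =>
        if PySem.List.pyGetD (PySem.List.pyGetD sudoku k []) l 0 == a then false else m') m) true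
    if manquant then liste ++ [a] else liste) []

-- ===== PORT B =====
def manquants_carre_alt (sudoku : List (List Int)) (i : Int) (j : Int) : List Int :=
  (PySem.List.pyRange 0 3 1).foldl (fun restants dk =>
    (PySem.List.pyRange 0 3 1).foldl (fun r dl =>
      let v := PySem.List.pyGetD
        (PySem.List.pyGetD sudoku (3 * (PySem.Int.floordiv i 3) + dk) [])
        (3 * (PySem.Int.floordiv j 3) + dl) 0
      if r.contains v then r.erase v else r) restants)
    (PySem.List.pyRange 1 10 1)

-- ===== PRECONDITION & SPEC =====
-- Pre_ excludes exactly the inputs where A's indexing sudoku[k][l] raises IndexError.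
def Pre_manquants_carre (sudoku : List (List Int)) (i : Int) (j : Int) : Prop :=
  ∀ k ∈ PySem.List.pyRange (3 * (PySem.Int.floordiv i 3)) (3 * (PySem.Int.floordiv i 3) + 3) 1,
    PySem.Raise.InRange sudoku.length k ∧
    ∀ l ∈ PySem.List.pyRange (3 * (PySem.Int.floordiv j 3)) (3 * (PySem.Int.floordiv j 3) + 3) 1,
      PySem.Raise.InRange (PySem.List.pyGetD sudoku k []).length l
instance (sudoku : List (List Int)) (i : Int) (j : Int) : Decidable (Pre_manquants_carre sudoku i j) := by unfold Pre_manquants_carre; infer_instance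

def pvWitness_manquants_carre : List (List Int) × Int × Int :=
  ([[1, 2, 3], [4, 0, 6], [7, 8, 9]], 0, 2)

def Spec_manquants_carre (sudoku : List (List Int)) (i : Int) (j : Int) (out : List Int) : Prop := out = manquants_carre_alt sudoku i j
instance (sudoku : List (List Int)) (i : Int) (j : Int) (out : List Int) : Decidable (Spec_manquants_carre sudoku i j out) := by unfold Spec_manquants_carre; infer_instance

-- ===== CLAIM (what is proved, stated in full; the proofs are below) =====
def Claim_equal_manquants_carre : Prop := ∀ (sudoku : List (List Int)) (i : Int) (j : Int), Dom_manquants_carre sudoku i j → Pre_manquants_carre sudoku i j → Spec_manquants_carre sudoku i j (manquants_carre sudoku i j)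

-- ===== LEMMAS AND PROOFS =====

-- the "manquant" flag of A's inner double scan, over an arbitrary list of cell values
theorem foldl_missing_flag (a : Int) (cells : List Int) (m0 : Bool) :
    cells.foldl (fun m c => if c == a then false else m) m0 = (m0 && !cells.contains a) := by
  induction cells generalizing m0 with
  | nil => simp
  | cons c cs ih =>
    rw [List.foldl_cons, ih]
    by_cases h : c = a
    · simp [h]
    · simp [h, Ne.symm h]

-- a fold of folds is a fold over the flattened list of scanned cell values
theorem foldl_foldl_flatMap_map {α β γ δ : Type} (ks : List α) (ls : List β)
    (v : α → β → δ) (f : γ → δ → γ) (init : γ) :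
    ks.foldl (fun m k => ls.foldl (fun m' l => f m' (v k l)) m) init
      = (ks.flatMap (fun k => ls.map (v k))).foldl f init := by
  induction ks generalizing init with
  | nil => rfl
  | cons k ks ih => simp [List.foldl_cons, List.flatMap_cons, List.foldl_append, ih, List.foldl_map]

-- B's erase loop over the scanned cells, starting from a duplicate-free candidate list,
-- keeps exactly the candidates not occurring among the cells
theorem foldl_erase_eq_filter (cells : List Int) (base : List Int) (h : base.Nodup) :
    cells.foldl (fun r v => if r.contains v then r.erase v else r) base
      = base.filter (fun a => !cells.contains a) := by
  induction cells generalizing base with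
  | nil => simp
  | cons c cs ih =>
    rw [List.foldl_cons]
    have hstep : (if base.contains c then base.erase c else base)
        = base.filter (fun a => a ≠ c) := by
      by_cases hc : c ∈ base
      · simp only [List.contains_eq_mem, hc, decide_true, if_true]
        simpa using h.erase_eq_filter c
      · simp only [List.contains_eq_mem, hc, decide_false]
        exact (List.filter_eq_self.mpr (fun a ha => by
          simp only [ne_eq, decide_eq_true_eq]
          rintro rfl; exact hc ha)).symm
    rw [hstep, ih _ (h.filter _)]
    rw [List.filter_filter]
    refine List.filter_congr (fun a _ => ?_)
    by_cases hac : a = c <;> simp [hac]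

theorem manquants_carre_eq_alt (sudoku : List (List Int)) (i : Int) (j : Int) :
    manquants_carre sudoku i j = manquants_carre_alt sudoku i j := by
  unfold manquants_carre manquants_carre_alt
  set i1 := 3 * (PySem.Int.floordiv i 3) with hi1
  set j1 := 3 * (PySem.Int.floordiv j 3) with hj1
  -- the list of cell values each side scans
  set cellsA := (PySem.List.pyRange i1 (i1 + 3) 1).flatMap (fun k =>
    (PySem.List.pyRange j1 (j1 + 3) 1).map (fun l =>
      PySem.List.pyGetD (PySem.List.pyGetD sudoku k []) l 0)) with hcA
  set cellsB := (PySem.List.pyRange 0 3 1).flatMap (fun dk =>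
    (PySem.List.pyRange 0 3 1).map (fun dl =>
      PySem.List.pyGetD (PySem.List.pyGetD sudoku (i1 + dk) []) (j1 + dl) 0)) with hcB
  have hcells : cellsA = cellsB := by
    rw [hcA, hcB, PySem.List.pyRange_one i1 (i1 + 3), PySem.List.pyRange_one j1 (j1 + 3),
      PySem.List.pyRange_one 0 3]
    simp [List.range_succ, Int.toNat]
  -- A's side: filter of candidates by absence among the cells
  have hA : (PySem.List.pyRange 1 10 1).foldl (fun liste a =>
      let manquant := (PySem.List.pyRange i1 (i1 + 3) 1).foldl (fun m k =>
        (PySem.List.pyRange j1 (j1 + 3) 1).foldl (fun m' l =>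
          if PySem.List.pyGetD (PySem.List.pyGetD sudoku k []) l 0 == a then false else m') m) true
      if manquant then liste ++ [a] else liste) []
      = (PySem.List.pyRange 1 10 1).filter (fun a => !cellsA.contains a) := by
    rw [PySem.List.foldl_append_if_eq_filter]
    refine List.filter_congr (fun a _ => ?_)
    rw [foldl_foldl_flatMap_map _ _ _ (fun m' (d : Int) => if d == a then false else m'),
      foldl_missing_flag]
    simp [hcA]
  -- B's side: the erase loop over the same cells
  have hB : (PySem.List.pyRange 0 3 1).foldl (fun restants dk =>
      (PySem.List.pyRange 0 3 1).foldl (fun (r : List Int) dl =>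
        let v := PySem.List.pyGetD (PySem.List.pyGetD sudoku (i1 + dk) []) (j1 + dl) 0
        if r.contains v then r.erase v else r) restants) (PySem.List.pyRange 1 10 1)
      = (PySem.List.pyRange 1 10 1).filter (fun a => !cellsB.contains a) := by
    simp only []
    rw [foldl_foldl_flatMap_map _ _
        (fun dk dl => PySem.List.pyGetD (PySem.List.pyGetD sudoku (i1 + dk) []) (j1 + dl) 0)
        (fun (r : List Int) (v : Int) => if r.contains v then r.erase v else r),
      ← hcB, foldl_erase_eq_filter _ _ (PySem.List.nodup_pyRange_one 1 10)]
  simp only [hA, hB, hcells]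

-- ===== VERDICT (by name: the statement is the Claim_ definition above) =====
theorem manquants_carre_spec : Claim_equal_manquants_carre := by
  intro sudoku i j _ _
  exact manquants_carre_eq_alt sudoku i j
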